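-- pv_equiv track=rewrite | github.com/asdfang/constraint-transformer-bach | Grader/find_repeated_sequences_1.py | pop_subsequences
-- ===== SOURCE A (Python) =====
-- def pop_subsequences(candidate_set):
--     """
--     remove redundant subsequences from the candidate set
--     """
--     to_pop = []
--     # for every sequence
--     for seq1 in candidate_set:
--         # find all subsequences
--         for seq2 in candidate_set:
--             if len(seq2) < len(seq1) and is_subset(seq1, seq2) and candidate_set[seq1][0] == candidate_set[seq2][0]:
--                 to_pop.append(seq2)
--
--     for seq in to_pop:
--         if seq in candidate_set:
--             candidate_set.pop(seq)
--
--     return candidate_set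
--
-- def is_subset(seq1, seq2):
--     """
--     Arguments
--         seq1, seq2: a sequence (tuple) of notes
--
--     check if seq2 is a strict subsequence of seq1
--     """
--     s1 = list(seq1)
--     s2 = list(seq2)
--     assert len(s2) < len(s1)
--     ln = len(seq2)
--     return any((all(s2[j] == s1[i + j] for j in range(ln)) for i in range(len(s1) - ln + 1)))
-- ===== SOURCE B (Python) =====
-- def pop_subsequences(candidate_set):
--     """
--     remove redundant subsequences from the candidate set
--
--     Instead of testing every pair of sequences, index by the dict itself:
--     for each sequence enumerate its strict contiguous substrings and look
--     them up in O(1).  (Mutates candidate_set in place, like the original.)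
--     """
--     to_remove = set()
--     for seq, val in candidate_set.items():
--         L = len(seq)
--         for l in range(L):
--             for i in range(L - l + 1):
--                 sub = seq[i:i + l]
--                 other = candidate_set.get(sub)
--                 if other is not None and other[0] == val[0]:
--                     to_remove.add(sub)
--     for k in to_remove:
--         del candidate_set[k]
--     return candidate_set
-- ===== Notes on version B (the rewrite author's own statement) =====
-- stated objective: faster
-- what changed: Instead of testing every pair of sequences with a quadratic substring scan, B enumerates each sequence's contiguous strict substrings once and marks removals via O(1) dict lookups, then deletes the marked keys.
import Mathlib
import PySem

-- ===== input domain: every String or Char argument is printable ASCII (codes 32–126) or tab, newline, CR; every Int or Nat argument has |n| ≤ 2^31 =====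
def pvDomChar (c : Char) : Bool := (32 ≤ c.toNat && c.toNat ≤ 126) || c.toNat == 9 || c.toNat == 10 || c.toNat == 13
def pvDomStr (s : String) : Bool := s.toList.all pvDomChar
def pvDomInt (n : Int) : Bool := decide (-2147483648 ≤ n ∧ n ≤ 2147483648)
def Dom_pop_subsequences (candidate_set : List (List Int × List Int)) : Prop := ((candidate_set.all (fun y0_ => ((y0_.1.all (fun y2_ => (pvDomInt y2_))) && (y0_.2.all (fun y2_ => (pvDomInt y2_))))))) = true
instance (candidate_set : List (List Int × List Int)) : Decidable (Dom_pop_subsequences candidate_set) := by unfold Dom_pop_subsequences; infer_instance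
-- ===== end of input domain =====

-- ===== PORT A =====
-- B is an asymptotically faster re-implementation; equivalence is about the RETURN value
-- (both Pythons also mutate the argument dict in the same way).

-- port of is_subset; exact at every call site of pop_subsequences (the guard
-- len(seq2) < len(seq1) holds there, so the assert never fires, the Nat ranges match
-- Python's and every index is in range, making getD exact)
def is_subset (seq1 seq2 : List Int) : Bool :=
  (List.range (seq1.length - seq2.length + 1)).any (fun i =>
    (List.range seq2.length).all (fun j => seq2.getD j 0 == seq1.getD (i + j) 0))

def pop_subsequences (candidate_set : List (List Int × List Int)) : List (List Int × List Int) :=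
  let d := PySem.Dict.mk candidate_set
  -- to_pop = []; for seq1 in candidate_set: for seq2 in candidate_set: if …: to_pop.append(seq2)
  let to_pop : List (List Int) :=
    d.keys.foldl (fun acc seq1 =>
      d.keys.foldl (fun acc seq2 =>
        if seq2.length < seq1.length && is_subset seq1 seq2 &&
            -- candidate_set[seq][0]: keys are present; [0] is exact under Pre_ (values reached are nonempty)
            ((d.getD seq1 []).getD 0 0 == (d.getD seq2 []).getD 0 0)
        then acc ++ [seq2] else acc) acc) []
  -- for seq in to_pop: if seq in candidate_set: candidate_set.pop(seq)
  (to_pop.foldl (fun d seq => if d.contains seq then d.erase seq else d) d).items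

-- ===== PORT B =====
-- the body of B's innermost loop: look the substring up, compare first values, mark it
def sub_hit (d : PySem.Dict (List Int) (List Int)) (val : List Int)
    (acc : PySem.Set (List Int)) (sub : List Int) : PySem.Set (List Int) :=
  match d.get? sub with
  | some other =>
      -- other[0] == val[0]: exact under Pre_ (these values are nonempty there)
      if other.getD 0 0 == val.getD 0 0 then PySem.Set.add acc sub else acc
  | none => acc

def pop_subsequences_alt (candidate_set : List (List Int × List Int)) : List (List Int × List Int) :=
  let d := PySem.Dict.mk candidate_set
  -- to_remove = set(); for seq, val in candidate_set.items(): for l in range(L): for i in range(L-l+1): …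
  let to_remove : PySem.Set (List Int) :=
    d.items.foldl (fun acc kv =>
      let L := kv.1.length
      (List.range L).foldl (fun acc (l : Nat) =>
        (List.range (L - l + 1)).foldl (fun acc (i : Nat) =>
          sub_hit d kv.2 acc
            (PySem.List.slice kv.1 (some (i : Int)) (some ((i : Int) + (l : Int))))) acc) acc)
      PySem.Set.empty
  -- for k in to_remove: del candidate_set[k]  (result independent of the set's iteration order)
  (to_remove.foldl (fun d k => d.erase k) d).items

-- ===== PRECONDITION & SPEC =====
-- Pre_ excludes (a) association lists whose keys repeat (a Python dict cannot hold them) and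
-- (b) inputs where some key is a strict contiguous substring of a longer key while either of
-- the two values is the empty list: there Python A raises IndexError on value[0] (and B does too).
def Pre_pop_subsequences (candidate_set : List (List Int × List Int)) : Prop :=
  (candidate_set.map Prod.fst).Nodup ∧
  ∀ p1 ∈ candidate_set, ∀ p2 ∈ candidate_set,
    p2.1.length < p1.1.length → p2.1 <:+: p1.1 → (p1.2 ≠ [] ∧ p2.2 ≠ [])
instance (candidate_set : List (List Int × List Int)) : Decidable (Pre_pop_subsequences candidate_set) := by
  unfold Pre_pop_subsequences; infer_instance

def pvWitness_pop_subsequences : (List (List Int × List Int)) := [([1, 2], [5]), ([1], [5]), ([3], [7])]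

def Spec_pop_subsequences (candidate_set : List (List Int × List Int)) (out : List (List Int × List Int)) : Prop := out = pop_subsequences_alt candidate_set
instance (candidate_set : List (List Int × List Int)) (out : List (List Int × List Int)) : Decidable (Spec_pop_subsequences candidate_set out) := by unfold Spec_pop_subsequences; infer_instance

-- ===== CLAIM (what is proved, stated in full; the proofs are below) =====
def Claim_equal_pop_subsequences : Prop := ∀ (candidate_set : List (List Int × List Int)), Dom_pop_subsequences candidate_set → Pre_pop_subsequences candidate_set → Spec_pop_subsequences candidate_set (pop_subsequences candidate_set)

-- ===== LEMMAS AND PROOFS =====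

-- generic membership through a foldl whose step adds exactly the elements satisfying Q
theorem mem_foldl_of_step {α β : Type} (step : List α → β → List α) (Q : β → α → Prop)
    (h : ∀ acc x y, y ∈ step acc x ↔ y ∈ acc ∨ Q x y) :
    ∀ (l : List β) (s : List α) (y : α), y ∈ l.foldl step s ↔ y ∈ s ∨ ∃ x ∈ l, Q x y := by
  intro l
  induction l with
  | nil => simp
  | cons b t ih =>
    intro s y
    simp only [List.foldl_cons, ih, h, List.mem_cons]
    constructor
    · rintro ((hs | hq) | ⟨x, hx, hq⟩)
      · exact Or.inl hs
      · exact Or.inr ⟨b, Or.inl rfl, hq⟩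
      · exact Or.inr ⟨x, Or.inr hx, hq⟩
    · rintro (hs | ⟨x, (rfl | hx), hq⟩)
      · exact Or.inl (Or.inl hs)
      · exact Or.inl (Or.inr hq)
      · exact Or.inr ⟨x, hx, hq⟩

-- the conditions the two loops test, as predicates on keys
def condA (d : PySem.Dict (List Int) (List Int)) (s1 s2 : List Int) : Prop :=
  s2.length < s1.length ∧ is_subset s1 s2 = true ∧
    (d.getD s1 []).getD 0 0 = (d.getD s2 []).getD 0 0

def condB (d : PySem.Dict (List Int) (List Int)) (kv : List Int × List Int) (s : List Int) : Prop :=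
  ∃ l ∈ List.range kv.1.length, ∃ i ∈ List.range (kv.1.length - l + 1),
    ∃ other, d.get? ((kv.1.drop i).take l) = some other ∧
      other.getD 0 0 = kv.2.getD 0 0 ∧ s = (kv.1.drop i).take l

-- membership in A's to_pop list
theorem mem_to_popA (d : PySem.Dict (List Int) (List Int)) (y : List Int) :
    (y ∈ d.keys.foldl (fun acc seq1 =>
      d.keys.foldl (fun acc seq2 =>
        if seq2.length < seq1.length && is_subset seq1 seq2 &&
            ((d.getD seq1 []).getD 0 0 == (d.getD seq2 []).getD 0 0)
        then acc ++ [seq2] else acc) acc) []) ↔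
    ∃ s1 ∈ d.keys, y ∈ d.keys ∧ condA d s1 y := by
  rw [mem_foldl_of_step _ (fun s1 y => y ∈ d.keys ∧ condA d s1 y)]
  · simp
  · intro acc s1 y
    rw [mem_foldl_of_step _ (fun s2 y => y = s2 ∧ condA d s1 s2)]
    · constructor
      · rintro (h | ⟨x, hx, rfl, hc⟩)
        · exact Or.inl h
        · exact Or.inr ⟨hx, hc⟩
      · rintro (h | ⟨hk, hc⟩)
        · exact Or.inl h
        · exact Or.inr ⟨y, hk, rfl, hc⟩
    · intro acc s2 z
      unfold condA
      split_ifs with hcnd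
      · simp only [Bool.and_eq_true, beq_iff_eq, decide_eq_true_eq] at hcnd
        simp only [List.mem_append, List.mem_singleton]
        constructor
        · rintro (h | rfl)
          · exact Or.inl h
          · exact Or.inr ⟨rfl, hcnd.1.1, hcnd.1.2, hcnd.2⟩
        · rintro (h | ⟨rfl, _⟩)
          · exact Or.inl h
          · exact Or.inr rfl
      · simp only [Bool.and_eq_true, beq_iff_eq, decide_eq_true_eq, not_and] at hcnd
        constructor
        · exact Or.inl
        · rintro (h | ⟨rfl, h1, h2, h3⟩)
          · exact h
          · exact absurd h3 (hcnd ⟨h1, h2⟩)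

-- membership through one sub_hit step
theorem mem_sub_hit (d : PySem.Dict (List Int) (List Int)) (val : List Int)
    (acc : PySem.Set (List Int)) (sub z : List Int) :
    z ∈ sub_hit d val acc sub ↔
      z ∈ acc ∨ ∃ other, d.get? sub = some other ∧ other.getD 0 0 = val.getD 0 0 ∧ z = sub := by
  unfold sub_hit
  cases hg : d.get? sub with
  | none => simp
  | some other =>
    by_cases hv : other.getD 0 0 = val.getD 0 0
    · simp only [hv, beq_self_eq_true, if_true, PySem.Set.mem_add]
      constructor
      · rintro (h | rfl)
        · exact Or.inl h
        · exact Or.inr ⟨other, rfl, hv, rfl⟩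
      · rintro (h | ⟨o, ho, _, rfl⟩)
        · exact Or.inl h
        · exact Or.inr rfl
    · simp only [beq_iff_eq, hv, if_false]
      constructor
      · exact Or.inl
      · rintro (h | ⟨o, ho, hvo, rfl⟩)
        · exact h
        · cases ho; exact absurd hvo hv

-- membership in B's to_remove set
theorem mem_to_removeB (d : PySem.Dict (List Int) (List Int)) (y : List Int) :
    (y ∈ d.items.foldl (fun acc kv =>
      (List.range kv.1.length).foldl (fun acc (l : Nat) =>
        (List.range (kv.1.length - l + 1)).foldl (fun acc (i : Nat) =>
          sub_hit d kv.2 acc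
            (PySem.List.slice kv.1 (some (i : Int)) (some ((i : Int) + (l : Int))))) acc) acc)
      PySem.Set.empty) ↔
    ∃ kv ∈ d.items, condB d kv y := by
  have hsl : ∀ (ks : List Int) (l i : Nat),
      PySem.List.slice ks (some (i : Int)) (some ((i : Int) + (l : Int))) = (ks.drop i).take l := by
    intro ks l i
    have := PySem.List.slice_natCast ks i (i + l)
    simpa [Nat.add_sub_cancel_left] using this
  have hinner : ∀ (kv : List Int × List Int) (l : Nat) (acc : List (List Int)) (i : Nat) (z : List Int),
      (z ∈ sub_hit d kv.2 acc
          (PySem.List.slice kv.1 (some (i : Int)) (some ((i : Int) + (l : Int))))) ↔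
      z ∈ acc ∨ (∃ other, d.get? ((kv.1.drop i).take l) = some other ∧
          other.getD 0 0 = kv.2.getD 0 0 ∧ z = (kv.1.drop i).take l) := by
    intro kv l acc i z
    rw [hsl kv.1 l i, mem_sub_hit]
  have hmid : ∀ (kv : List Int × List Int) (acc : List (List Int)) (l : Nat) (y : List Int),
      (y ∈ (List.range (kv.1.length - l + 1)).foldl (fun acc (i : Nat) =>
          sub_hit d kv.2 acc
            (PySem.List.slice kv.1 (some (i : Int)) (some ((i : Int) + (l : Int))))) acc) ↔
      y ∈ acc ∨ ∃ i ∈ List.range (kv.1.length - l + 1),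
        ∃ other, d.get? ((kv.1.drop i).take l) = some other ∧
          other.getD 0 0 = kv.2.getD 0 0 ∧ y = (kv.1.drop i).take l :=
    fun kv acc l y => mem_foldl_of_step _ _ (hinner kv l) _ _ _
  have houter : ∀ (acc : List (List Int)) (kv : List Int × List Int) (y : List Int),
      (y ∈ (List.range kv.1.length).foldl (fun acc (l : Nat) =>
        (List.range (kv.1.length - l + 1)).foldl (fun acc (i : Nat) =>
          sub_hit d kv.2 acc
            (PySem.List.slice kv.1 (some (i : Int)) (some ((i : Int) + (l : Int))))) acc) acc) ↔
      y ∈ acc ∨ condB d kv y :=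
    fun acc kv y => mem_foldl_of_step _ _ (hmid kv) _ _ _
  rw [mem_foldl_of_step _ _ houter]
  simp [PySem.Set.empty]

-- the combinatorial core: is_subset tests exactly "contiguous substring"
theorem is_subset_iff (s1 s2 : List Int) (hlt : s2.length < s1.length) :
    is_subset s1 s2 = true ↔ ∃ i, i ≤ s1.length - s2.length ∧ s2 = (s1.drop i).take s2.length := by
  unfold is_subset
  rw [List.any_eq_true]
  constructor
  · rintro ⟨i, hi, hall⟩
    rw [List.mem_range] at hi
    rw [List.all_eq_true] at hall
    refine ⟨i, by omega, ?_⟩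
    apply List.ext_getElem (by simp; omega)
    intro j hj hj'
    have := hall j (List.mem_range.mpr hj)
    rw [beq_iff_eq, List.getD_eq_getElem s2 0 hj, List.getD_eq_getElem s1 0 (by omega)] at this
    simp only [List.getElem_take, List.getElem_drop]
    exact this
  · rintro ⟨i, hi, hs2⟩
    refine ⟨i, List.mem_range.mpr (by omega), ?_⟩
    rw [List.all_eq_true]
    intro j hj
    rw [List.mem_range] at hj
    rw [beq_iff_eq]
    have hlt1 : i + j < s1.length := by omega
    have hlen2 : j < ((s1.drop i).take s2.length).length := by simp; omega
    have h := congrArg (fun L : List Int => L.getD j 0) hs2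
    simp only at h
    rw [List.getD_eq_getElem s2 0 hj, List.getD_eq_getElem _ 0 hlen2] at h
    rw [List.getD_eq_getElem s2 0 hj, List.getD_eq_getElem s1 0 hlt1, h]
    simp [List.getElem_take, List.getElem_drop]

-- erase-with-guard loop (A) = plain filter on items
theorem foldl_erase_guard (L : List (List Int)) :
    ∀ d : PySem.Dict (List Int) (List Int),
    (L.foldl (fun d seq => if d.contains seq then d.erase seq else d) d).items =
      d.items.filter (fun p => !(L.contains p.1)) := by
  induction L with
  | nil => intro d; simp
  | cons s t ih =>
    intro d
    have hstep : (if d.contains s then d.erase s else d).items =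
        d.items.filter (fun p => !(p.1 == s)) := by
      by_cases hc : d.contains s = true
      · simp [hc, PySem.Dict.erase]
      · simp only [hc, if_neg, Bool.false_eq_true, not_false_iff]
        have hnk : s ∉ d.keys := by
          intro hmem
          exact hc (PySem.Dict.contains_iff_mem_keys d s |>.mpr hmem)
        symm
        apply List.filter_eq_self.mpr
        intro p hp
        simp only [Bool.not_eq_eq_eq_not, Bool.not_true, beq_eq_false_iff_ne, ne_eq]
        rintro rfl
        exact hnk (PySem.Dict.mem_keys_of_mem_items d hp)
    rw [List.foldl_cons, ih, hstep, List.filter_filter]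
    apply List.filter_congr
    intro p hp
    by_cases h : p.1 = s <;> simp [h, Bool.and_comm]

-- erase loop (B) = plain filter on items
theorem foldl_erase (L : List (List Int)) :
    ∀ d : PySem.Dict (List Int) (List Int),
    (L.foldl (fun d k => d.erase k) d).items =
      d.items.filter (fun p => !(L.contains p.1)) := by
  induction L with
  | nil => intro d; simp
  | cons s t ih =>
    intro d
    rw [List.foldl_cons, ih]
    have : (d.erase s).items = d.items.filter (fun p => !(p.1 == s)) := by
      simp [PySem.Dict.erase]
    rw [this, List.filter_filter]
    apply List.filter_congr
    intro p hp
    by_cases h : p.1 = s <;> simp [h, Bool.and_comm]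

-- the two removal collections have the same members (on a dict with Nodup keys)
theorem key_iff (d : PySem.Dict (List Int) (List Int)) (hnd : d.keys.Nodup) (y : List Int) :
    (∃ s1 ∈ d.keys, y ∈ d.keys ∧ condA d s1 y) ↔ ∃ kv ∈ d.items, condB d kv y := by
  constructor
  · rintro ⟨s1, hs1, hyk, hlen, hsub, hval⟩
    obtain ⟨kv1, hkv1, rfl⟩ := List.mem_map.mp hs1
    obtain ⟨kv2, hkv2, rfl⟩ := List.mem_map.mp hyk
    obtain ⟨i, hi, hy⟩ := (is_subset_iff _ _ hlen).mp hsub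
    refine ⟨kv1, hkv1, kv2.1.length, List.mem_range.mpr hlen, i, List.mem_range.mpr (by omega),
      kv2.2, ?_, ?_, hy⟩
    · rw [← hy]
      exact (PySem.Dict.get?_eq_some_iff_mem_items d kv2.1 kv2.2 hnd).mpr (by simpa using hkv2)
    · rw [PySem.Dict.getD_of_mem_items d (by simpa using hkv1 : (kv1.1, kv1.2) ∈ d.items) hnd,
        PySem.Dict.getD_of_mem_items d (by simpa using hkv2 : (kv2.1, kv2.2) ∈ d.items) hnd] at hval
      exact hval.symm
  · rintro ⟨kv1, hkv1, l, hl, i, hi, other, hget, hveq, hy⟩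
    rw [List.mem_range] at hl hi
    have hylen : y.length = l := by
      rw [hy]; simp; omega
    have hyit : (y, other) ∈ d.items := by
      apply (PySem.Dict.get?_eq_some_iff_mem_items d y other hnd).mp
      rw [hy]; exact hget
    refine ⟨kv1.1, List.mem_map.mpr ⟨kv1, hkv1, rfl⟩,
      List.mem_map.mpr ⟨(y, other), hyit, rfl⟩, by omega, ?_, ?_⟩
    · apply (is_subset_iff kv1.1 y (by omega)).mpr
      exact ⟨i, by omega, by rw [hylen]; exact hy⟩
    · rw [PySem.Dict.getD_of_mem_items d (by simpa using hkv1 : (kv1.1, kv1.2) ∈ d.items) hnd,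
        PySem.Dict.getD_of_mem_items d hyit hnd]
      exact hveq.symm

-- ===== VERDICT (by name: the statement is the Claim_ definition above) =====
theorem pop_subsequences_spec : Claim_equal_pop_subsequences := by
  intro cs _ hpre
  unfold Spec_pop_subsequences
  obtain ⟨hnd, -⟩ := hpre
  have hnd' : (PySem.Dict.mk cs).keys.Nodup := by
    simpa [PySem.Dict.keys, PySem.Dict.items] using hnd
  simp only [pop_subsequences, pop_subsequences_alt]
  rw [foldl_erase_guard, foldl_erase]
  apply List.filter_congr
  intro p hp
  have hiff := (mem_to_popA (PySem.Dict.mk cs) p.1).trans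
    ((key_iff (PySem.Dict.mk cs) hnd' p.1).trans (mem_to_removeB (PySem.Dict.mk cs) p.1).symm)
  simp only [List.contains_eq_mem]
  simp only [hiff]
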